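-- pv_equiv track=rewrite | github.com/key4hep/k4FWCore | k4FWCore/helpers/gaudi_gen.py | _wrap_angle_args
-- ===== SOURCE A (Python) =====
-- from typing import List, Tuple
-- from typing import List, Tuple, Optional
--
-- def _split_top_level(s: str, delim: str = ',', openers: str = '<([{', closers: str = '>)]}') -> List[str]:
--     """Split string at top-level delimiter (not inside brackets)."""
--     parts, depth, buf = [], 0, ''
--     i = 0
--     while i < len(s):
--         c = s[i]
--         if c in openers:   depth += 1
--         elif c in closers: depth -= 1
--         if s[i:i+len(delim)] == delim and depth == 0:
--             parts.append(buf); buf = ''; i += len(delim); continue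
--         buf += c; i += 1
--     parts.append(buf)
--     return parts
--
-- def _find_matching(s: str, start: int, open_c: str, close_c: str) -> int:
--     """Return index of the closing char matching open_c at s[start]."""
--     depth = 0
--     for i in range(start, len(s)):
--         if s[i] == open_c:   depth += 1
--         elif s[i] == close_c:
--             depth -= 1
--             if depth == 0: return i
--     return -1
--
-- def _wrap_angle_args(line: str, indent: str, col: int) -> str:
--     """
--     Reformat  prefix<A, B, C>suffix  as
--       prefix<
--         A,
--         B,
--         C>suffix
--     where indent is the base indent of the continuation lines.
--     """
--     lt = line.find('<')
--     if lt == -1: return line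
--     gt = _find_matching(line, lt, '<', '>')
--     if gt == -1: return line
--     inner  = line[lt+1:gt]
--     parts  = [p.strip() for p in _split_top_level(inner)]
--     if len(parts) <= 1: return line
--     cont   = indent + '    '
--     joined = (',\n' + cont).join(parts)
--     return line[:lt+1] + '\n' + cont + joined + '\n' + indent + line[gt:]
-- ===== SOURCE B (Python) =====
-- def _wrap_angle_args(line: str, indent: str, col: int) -> str:
--     """Single fused pass: find '<', then walk once keeping an angle-only depth
--     (to locate the matching '>') and a full-bracket depth (to split at
--     top-level commas), collecting stripped parts on the fly."""
--     lt = line.find('<')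
--     if lt == -1:
--         return line
--     adepth, fdepth = 1, 0
--     parts, buf = [], []
--     gt = -1
--     for i in range(lt + 1, len(line)):
--         c = line[i]
--         if c == '>' and adepth == 1:
--             gt = i
--             break
--         if c == '<':
--             adepth += 1
--         elif c == '>':
--             adepth -= 1
--         if c in '<([{':
--             fdepth += 1
--         elif c in '>)]}':
--             fdepth -= 1
--         if c == ',' and fdepth == 0:
--             parts.append(''.join(buf).strip())
--             buf = []
--         else:
--             buf.append(c)
--     if gt == -1:
--         return line
--     parts.append(''.join(buf).strip())
--     if len(parts) <= 1:
--         return line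
--     cont = indent + '    '
--     return (line[:lt + 1] + '\n' + cont + (',\n' + cont).join(parts)
--             + '\n' + indent + line[gt:])
-- ===== Notes on version B (the rewrite author's own statement) =====
-- stated objective: simpler
-- what changed: A's two helper scans (_find_matching over the whole tail, then _split_top_level over the extracted inner text) are fused into one helper-free pass that simultaneously tracks an angle-only depth to locate the matching '>' and a full-bracket depth to split at top-level commas, collecting stripped parts on the fly.
import Mathlib
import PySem

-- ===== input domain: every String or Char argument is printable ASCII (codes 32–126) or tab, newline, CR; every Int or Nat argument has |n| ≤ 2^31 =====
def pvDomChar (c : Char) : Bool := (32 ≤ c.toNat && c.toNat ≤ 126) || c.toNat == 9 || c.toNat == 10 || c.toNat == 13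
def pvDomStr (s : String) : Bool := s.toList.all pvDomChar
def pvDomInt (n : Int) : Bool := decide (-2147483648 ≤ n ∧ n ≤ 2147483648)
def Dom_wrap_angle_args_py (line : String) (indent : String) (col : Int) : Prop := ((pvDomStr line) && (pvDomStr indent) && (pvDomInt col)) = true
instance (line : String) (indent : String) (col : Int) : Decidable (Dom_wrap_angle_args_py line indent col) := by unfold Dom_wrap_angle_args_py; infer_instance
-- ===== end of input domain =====

-- B fuses A's two helper scans (_find_matching + _split_top_level) into one pass; same cost, simpler decomposition.

-- ===== PORT A =====
-- port of _find_matching's scan from `start`: returns the offset (into the suffix) of the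
-- matching closer, none = Python's -1
def pvFindM (cs : List Char) (openC closeC : Char) (depth : Int) : Option Nat :=
  match cs with
  | [] => none
  | c :: rest =>
    if c = openC then (pvFindM rest openC closeC (depth + 1)).map (· + 1)
    else if c = closeC then
      if depth - 1 = 0 then some 0
      else (pvFindM rest openC closeC (depth - 1)).map (· + 1)
    else (pvFindM rest openC closeC depth).map (· + 1)

-- port of _split_top_level (delim ',', default bracket sets), state = (depth, buf, parts)
def pvSplitTop (cs : List Char) (depth : Int) (buf : List Char) (parts : List (List Char)) : List (List Char) :=
  match cs with
  | [] => parts ++ [buf]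
  | c :: rest =>
    let d := if c ∈ ['<', '(', '[', '{'] then depth + 1
             else if c ∈ ['>', ')', ']', '}'] then depth - 1 else depth
    if c = ',' ∧ d = 0 then pvSplitTop rest d [] (parts ++ [buf])
    else pvSplitTop rest d (buf ++ [c]) parts

def wrap_angle_args_py (line : String) (indent : String) (col : Int) : String :=
  let cs := line.toList
  let lt := PySem.Chars.find cs ['<']
  if lt = -1 then line else
  let ltN := lt.toNat
  match pvFindM (cs.drop ltN) '<' '>' 0 with
  | none => line
  | some off =>
    let gt := ltN + off
    let inner := (cs.drop (ltN + 1)).take (gt - (ltN + 1))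
    let parts := (pvSplitTop inner 0 [] []).map PySem.Chars.strip
    if parts.length ≤ 1 then line else
    let cont := indent.toList ++ [' ', ' ', ' ', ' ']
    let joined := List.intercalate ([',', '\n'] ++ cont) parts
    String.ofList (cs.take (ltN + 1) ++ ['\n'] ++ cont ++ joined ++ ['\n'] ++ indent.toList ++ cs.drop gt)

-- ===== PORT B =====
-- B's single fused loop over the suffix after '<': angle-only depth `ad`, full-bracket
-- depth `fd`, stripped parts collected on the fly; returns (parts, offset of matching '>')
def pvFused (cs : List Char) (ad fd : Int) (buf : List Char) (parts : List (List Char)) : Option (List (List Char) × Nat) :=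
  match cs with
  | [] => none
  | c :: rest =>
    if c = '>' ∧ ad = 1 then some (parts ++ [PySem.Chars.strip buf], 0)
    else
      let ad' := if c = '<' then ad + 1 else if c = '>' then ad - 1 else ad
      let fd' := if c ∈ ['<', '(', '[', '{'] then fd + 1
                 else if c ∈ ['>', ')', ']', '}'] then fd - 1 else fd
      if c = ',' ∧ fd' = 0 then
        (pvFused rest ad' fd' [] (parts ++ [PySem.Chars.strip buf])).map (fun pk => (pk.1, pk.2 + 1))
      else
        (pvFused rest ad' fd' (buf ++ [c]) parts).map (fun pk => (pk.1, pk.2 + 1))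

def wrap_angle_args_py_alt (line : String) (indent : String) (col : Int) : String :=
  let cs := line.toList
  let lt := PySem.Chars.find cs ['<']
  if lt = -1 then line else
  let ltN := lt.toNat
  match pvFused (cs.drop (ltN + 1)) 1 0 [] [] with
  | none => line
  | some pk =>
    if pk.1.length ≤ 1 then line else
    let gt := ltN + 1 + pk.2
    let cont := indent.toList ++ [' ', ' ', ' ', ' ']
    String.ofList (cs.take (ltN + 1) ++ ['\n'] ++ cont ++ List.intercalate ([',', '\n'] ++ cont) pk.1 ++ ['\n'] ++ indent.toList ++ cs.drop gt)

-- ===== PRECONDITION & SPEC =====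
def Spec_wrap_angle_args_py (line : String) (indent : String) (col : Int) (out : String) : Prop := out = wrap_angle_args_py_alt line indent col
instance (line : String) (indent : String) (col : Int) (out : String) : Decidable (Spec_wrap_angle_args_py line indent col out) := by unfold Spec_wrap_angle_args_py; infer_instance

-- ===== CLAIM (what is proved, stated in full; the proofs are below) =====
def Claim_equal_wrap_angle_args_py : Prop := ∀ (line : String) (indent : String) (col : Int), Dom_wrap_angle_args_py line indent col → Spec_wrap_angle_args_py line indent col (wrap_angle_args_py line indent col)

-- ===== LEMMAS AND PROOFS =====

-- pvSplitTop only ever appends to its parts accumulator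
theorem pvSplitTop_acc (cs : List Char) (d : Int) (buf : List Char) (p : List (List Char)) :
    pvSplitTop cs d buf p = p ++ pvSplitTop cs d buf [] := by
  induction cs generalizing d buf p with
  | nil => simp [pvSplitTop]
  | cons c rest ih =>
    simp only [pvSplitTop]
    split_ifs <;>
      first
        | (rw [ih _ [] (p ++ [buf]), ih _ [] ([] ++ [buf])]; simp)
        | rw [ih]

-- the fused loop = find-matching composed with split-then-strip
theorem pvFused_eq (cs : List Char) (ad fd : Int) (buf : List Char) (parts : List (List Char))
    (had : 1 ≤ ad) :
    pvFused cs ad fd buf parts =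
      (pvFindM cs '<' '>' ad).map
        (fun k => (parts ++ (pvSplitTop (cs.take k) fd buf []).map PySem.Chars.strip, k)) := by
  induction cs generalizing ad fd buf parts with
  | nil => simp [pvFused, pvFindM]
  | cons c rest ih =>
    by_cases hc : c = '>' ∧ ad = 1
    · obtain ⟨hc1, hc2⟩ := hc
      subst hc1; subst hc2
      simp [pvFused, pvFindM, pvSplitTop]
    · -- termination case excluded
      have had' : 1 ≤ (if c = '<' then ad + 1 else if c = '>' then ad - 1 else ad) := by
        split_ifs with h1 h2
        · omega
        · rcases lt_or_eq_of_le had with h | h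
          · omega
          · exact absurd ⟨h2, h.symm⟩ hc
        · exact had
      rw [pvFused]
      simp only [if_neg hc]
      have hfind : pvFindM (c :: rest) '<' '>' ad =
          (pvFindM rest '<' '>' (if c = '<' then ad + 1 else if c = '>' then ad - 1 else ad)).map (· + 1) := by
        rw [pvFindM]
        split_ifs with h1 h2 h3
        · rfl
        · exfalso; exact hc ⟨h2, by omega⟩
        · rfl
        · rfl
      rw [hfind]
      set ad' := if c = '<' then ad + 1 else if c = '>' then ad - 1 else ad with had_def
      set fd' := if c ∈ ['<', '(', '[', '{'] then fd + 1
                 else if c ∈ ['>', ')', ']', '}'] then fd - 1 else fd with hfd_def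
      by_cases hcm : c = ',' ∧ fd' = 0
      · rw [if_pos hcm, ih _ _ _ _ had']
        cases hfm : pvFindM rest '<' '>' ad' with
        | none => rfl
        | some k =>
          simp only [Option.map_some, Option.some.injEq, Prod.mk.injEq]
          refine ⟨?_, trivial⟩
          · rw [List.take_succ_cons, pvSplitTop]
            simp only [← hfd_def]
            rw [if_pos hcm, pvSplitTop_acc _ _ _ ([] ++ [buf])]
            simp
      · rw [if_neg hcm, ih _ _ _ _ had']
        cases hfm : pvFindM rest '<' '>' ad' with
        | none => rfl
        | some k =>
          simp only [Option.map_some, Option.some.injEq, Prod.mk.injEq]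
          refine ⟨?_, trivial⟩
          rw [List.take_succ_cons, pvSplitTop]
          simp only [← hfd_def]
          rw [if_neg hcm]

-- ===== VERDICT (by name: the statement is the Claim_ definition above) =====
theorem wrap_angle_args_py_spec : Claim_equal_wrap_angle_args_py := by
  intro line indent col _
  show wrap_angle_args_py line indent col = wrap_angle_args_py_alt line indent col
  unfold wrap_angle_args_py wrap_angle_args_py_alt
  set cs := line.toList with hcs
  by_cases hlt : PySem.Chars.find cs ['<'] = -1
  · simp [hlt]
  · simp only [if_neg hlt]
    have h0 : 0 ≤ PySem.Chars.find cs ['<'] := by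
      have := PySem.Chars.neg_one_le_find cs ['<']
      omega
    set ltN := (PySem.Chars.find cs ['<']).toNat with hltN
    -- the char at ltN is '<'
    have hpre : ['<'] <+: cs.drop ltN := (PySem.Chars.find_spec h0).1
    obtain ⟨t, ht⟩ := hpre
    have hdrop1 : cs.drop (ltN + 1) = t := by
      have h2 : (cs.drop ltN).drop 1 = t := by rw [← ht]; simp
      rw [← h2, List.drop_drop, Nat.add_comm]
    have hsplit : pvFindM (cs.drop ltN) '<' '>' 0 =
        (pvFindM (cs.drop (ltN + 1)) '<' '>' 1).map (· + 1) := by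
      rw [← ht, hdrop1]
      simp [pvFindM]
    rw [hsplit, pvFused_eq _ 1 0 [] [] (le_refl 1)]
    cases hfm : pvFindM (cs.drop (ltN + 1)) '<' '>' 1 with
    | none => simp
    | some k =>
      simp only [Option.map_some]
      have harith : ltN + (k + 1) - (ltN + 1) = k := by omega
      simp only [harith, List.nil_append]
      have hgt : ltN + (k + 1) = ltN + 1 + k := by omega
      rw [hgt]
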